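-- pv_equiv track=rewrite | github.com/StephenD1981/radcom-detectors | ran_optimizer/recommendations/interference.py | _determine_primary_cause
-- ===== SOURCE A (Python) =====
-- from typing import Tuple, Optional, List
--
-- def _determine_primary_cause(causes: List[str]) -> str:
--     """Determine the primary root cause from a list of causes."""
--     # Priority order for root causes
--     cause_priority = [
--         'tall_site_overshoot',  # Fix #8: height-aware overshoot detection
--         'low_tilt',
--         'very_close_proximity',
--         'azimuth_convergence',
--         'close_proximity',
--         'inconsistent_tilt',
--     ]
--
--     for cause in cause_priority:
--         if cause in causes:
--             return cause
--
--     if causes: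
--         return causes[0]
--     return 'undetermined'
-- ===== SOURCE B (Python) =====
-- from typing import List
--
--
-- def _determine_primary_cause(causes: List[str]) -> str:
--     """Determine the primary root cause from a list of causes."""
--     if not causes:
--         return 'undetermined'
--     cause_priority = [
--         'tall_site_overshoot',
--         'low_tilt',
--         'very_close_proximity',
--         'azimuth_convergence',
--         'close_proximity',
--         'inconsistent_tilt',
--     ]
--     rank = {cause: i for i, cause in enumerate(cause_priority)}
--     # Highest-priority cause present; ranks all tie at len(cause_priority)
--     # when none is present, so min's first-wins rule yields causes[0].
--     return min(causes, key=lambda c: rank.get(c, len(cause_priority)))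
-- ===== Notes on version B (the rewrite author's own statement) =====
-- stated objective: idiomatic
-- what changed: Instead of scanning the causes list once per priority entry (for cause in priority: if cause in causes), B builds a rank dict over the priority list once and takes min(causes, key=rank.get) in a single pass over causes, with the empty case guarded up front.
import Mathlib
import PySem

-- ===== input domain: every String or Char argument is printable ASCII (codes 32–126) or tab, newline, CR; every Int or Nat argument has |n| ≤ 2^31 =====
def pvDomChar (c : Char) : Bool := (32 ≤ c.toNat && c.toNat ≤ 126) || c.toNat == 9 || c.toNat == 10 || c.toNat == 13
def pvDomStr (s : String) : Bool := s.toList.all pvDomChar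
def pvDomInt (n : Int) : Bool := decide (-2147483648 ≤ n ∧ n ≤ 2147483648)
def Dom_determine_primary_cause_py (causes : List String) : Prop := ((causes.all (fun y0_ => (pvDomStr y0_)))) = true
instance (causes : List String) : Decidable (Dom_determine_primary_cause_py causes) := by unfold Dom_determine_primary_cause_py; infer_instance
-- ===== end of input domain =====

-- B replaces A's per-priority scans of `causes` (one `in` test per priority entry) with a rank
-- dict built once over the priority list and a single `min(causes, key=rank.get)` pass (idiomatic).


-- ===== PORT A =====
-- A's priority list constant
def pvCausePriority : List String :=
  ["tall_site_overshoot", "low_tilt", "very_close_proximity",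
   "azimuth_convergence", "close_proximity", "inconsistent_tilt"]

-- 'for cause in cause_priority: if cause in causes: return cause' = find? over the priority list
def determine_primary_cause_py (causes : List String) : String :=
  match pvCausePriority.find? (fun cause => causes.contains cause) with
  | some cause => cause
  | none =>
    match causes with
    | [] => "undetermined"
    | c :: _ => c

-- ===== PORT B =====
-- B's priority list constant
def pvAltPriority : List String :=
  ["tall_site_overshoot", "low_tilt", "very_close_proximity",
   "azimuth_convergence", "close_proximity", "inconsistent_tilt"]

-- rank = {cause: i for i, cause in enumerate(cause_priority)}
def pvAltRank : PySem.Dict String Int :=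
  (PySem.List.enumerate pvAltPriority).foldl
    (fun d p => d.insert p.2 p.1) (PySem.Dict.mk [])

-- min(causes, key=lambda c: rank.get(c, len(cause_priority))) after the empty guard
def determine_primary_cause_py_alt (causes : List String) : String :=
  match causes with
  | [] => "undetermined"
  | c :: rest =>
    (PySem.List.min? (c :: rest)
      (fun x => pvAltRank.getD x (pvAltPriority.length : Int))).getD c

-- ===== PRECONDITION & SPEC =====
def Spec_determine_primary_cause_py (causes : List String) (out : String) : Prop := out = determine_primary_cause_py_alt causes
instance (causes : List String) (out : String) : Decidable (Spec_determine_primary_cause_py causes out) := by unfold Spec_determine_primary_cause_py; infer_instance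

-- ===== CLAIM (what is proved, stated in full; the proofs are below) =====
def Claim_equal_determine_primary_cause_py : Prop := ∀ (causes : List String), Dom_determine_primary_cause_py causes → Spec_determine_primary_cause_py causes (determine_primary_cause_py causes)

-- ===== LEMMAS AND PROOFS =====

-- the key function B sorts on
def pvKey (x : String) : Int := pvAltRank.getD x (pvAltPriority.length : Int)

theorem pvAltRank_items : pvAltRank.items =
    [("tall_site_overshoot", (0:Int)), ("low_tilt", 1), ("very_close_proximity", 2),
     ("azimuth_convergence", 3), ("close_proximity", 4), ("inconsistent_tilt", 5)] := by decide

theorem pvKey_eq (x : String) : pvKey x =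
    if "tall_site_overshoot" = x then 0
    else if "low_tilt" = x then 1
    else if "very_close_proximity" = x then 2
    else if "azimuth_convergence" = x then 3
    else if "close_proximity" = x then 4
    else if "inconsistent_tilt" = x then 5
    else 6 := by
  simp only [pvKey, PySem.Dict.getD, PySem.Dict.get?, pvAltRank_items, List.find?,
    pvAltPriority]
  split_ifs <;> first
    | (subst_vars; decide)
    | (rw [beq_eq_false_iff_ne.mpr ‹¬"tall_site_overshoot" = x›,
          beq_eq_false_iff_ne.mpr ‹¬"low_tilt" = x›,
          beq_eq_false_iff_ne.mpr ‹¬"very_close_proximity" = x›,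
          beq_eq_false_iff_ne.mpr ‹¬"azimuth_convergence" = x›,
          beq_eq_false_iff_ne.mpr ‹¬"close_proximity" = x›,
          beq_eq_false_iff_ne.mpr ‹¬"inconsistent_tilt" = x›]; rfl)

-- min?'s fold step
def pvStep (acc : Option String) (x : String) : Option String :=
  match acc with
  | none => some x
  | some m => if pvKey x < pvKey m then some x else some m

theorem pvMin_eq_of (t : List String) (m p : String)
    (hmem : p ∈ m :: t)
    (hmin : ∀ y ∈ m :: t, pvKey p ≤ pvKey y)
    (huniq : ∀ y ∈ m :: t, pvKey y = pvKey p → y = p) :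
    t.foldl pvStep (some m) = some p := by
  induction t generalizing m with
  | nil =>
    simp at hmem; simp [hmem]
  | cons y t' ih =>
    simp only [List.mem_cons] at hmem
    by_cases hlt : pvKey y < pvKey m
    · have hstep : pvStep (some m) y = some y := by simp [pvStep, if_pos hlt]
      simp only [List.foldl_cons, hstep]
      apply ih y
      · rcases hmem with h | h | h
        · exfalso
          subst h
          have := hmin y (by simp)
          omega
        · simp [h]
        · simp [h]
      · intro z hz
        apply hmin
        simp only [List.mem_cons] at hz ⊢
        tauto
      · intro z hz
        apply huniq
        simp only [List.mem_cons] at hz ⊢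
        tauto
    · have hstep : pvStep (some m) y = some m := by simp [pvStep, if_neg hlt]
      simp only [List.foldl_cons, hstep]
      apply ih m
      · rcases hmem with h | h | h
        · simp [h]
        · have h1 := hmin m (by simp)
          have h2 : pvKey m = pvKey p := by
            subst h
            omega
          have := huniq m (by simp) h2
          simp [this]
        · simp [h]
      · intro z hz
        apply hmin
        simp only [List.mem_cons] at hz ⊢
        tauto
      · intro z hz
        apply huniq
        simp only [List.mem_cons] at hz ⊢
        tauto

theorem pvMin_eq_head (t : List String) (m : String)
    (h : ∀ y ∈ t, ¬ pvKey y < pvKey m) :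
    t.foldl pvStep (some m) = some m := by
  induction t with
  | nil => rfl
  | cons y t' ih =>
    have hy : ¬ pvKey y < pvKey m := h y (by simp)
    simp only [List.foldl_cons, pvStep, if_neg hy]
    exact ih (fun z hz => h z (by simp [hz]))

theorem pvMin?_eq (c : String) (rest : List String) :
    PySem.List.min? (c :: rest) pvKey = rest.foldl pvStep (some c) := by
  unfold PySem.List.min?
  rw [List.foldl_cons]
  exact List.foldl_ext _ _ _ (fun a x _ => by cases a <;> rfl)

-- ===== VERDICT (by name: the statement is the Claim_ definition above) =====
theorem determine_primary_cause_py_spec : Claim_equal_determine_primary_cause_py := by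
  unfold Claim_equal_determine_primary_cause_py
  intro causes _
  unfold Spec_determine_primary_cause_py
  cases causes with
  | nil => rfl
  | cons c rest =>
    have hB : determine_primary_cause_py_alt (c :: rest)
        = (rest.foldl pvStep (some c)).getD c := by
      show (PySem.List.min? (c :: rest) pvKey).getD c = _
      rw [pvMin?_eq]
    by_cases h0 : ("tall_site_overshoot" : String) ∈ c :: rest
    · have hA : determine_primary_cause_py (c :: rest) = "tall_site_overshoot" := by
        simp only [determine_primary_cause_py, pvCausePriority, List.find?, List.contains_eq_mem, decide_eq_true h0]
      have hk0 : pvKey "tall_site_overshoot" = 0 := by rw [pvKey_eq]; simp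
      rw [hA, hB, pvMin_eq_of rest c "tall_site_overshoot" h0]
      · rfl
      · intro y hy
        rw [pvKey_eq y, hk0]
        split_ifs <;> first | omega | (subst_vars; contradiction)
      · intro y hy hk
        rw [pvKey_eq y, hk0] at hk
        split_ifs at hk <;> first | (subst_vars; first | rfl | contradiction) | exact absurd hk (by decide)
    · by_cases h1 : ("low_tilt" : String) ∈ c :: rest
      · have hA : determine_primary_cause_py (c :: rest) = "low_tilt" := by
          simp only [determine_primary_cause_py, pvCausePriority, List.find?, List.contains_eq_mem, decide_eq_false h0, decide_eq_true h1]
        have hk1 : pvKey "low_tilt" = 1 := by rw [pvKey_eq]; simp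
        rw [hA, hB, pvMin_eq_of rest c "low_tilt" h1]
        · rfl
        · intro y hy
          rw [pvKey_eq y, hk1]
          split_ifs <;> first | omega | (subst_vars; contradiction)
        · intro y hy hk
          rw [pvKey_eq y, hk1] at hk
          split_ifs at hk <;> first | (subst_vars; first | rfl | contradiction) | exact absurd hk (by decide)
      · by_cases h2 : ("very_close_proximity" : String) ∈ c :: rest
        · have hA : determine_primary_cause_py (c :: rest) = "very_close_proximity" := by
            simp only [determine_primary_cause_py, pvCausePriority, List.find?, List.contains_eq_mem, decide_eq_false h0, decide_eq_false h1, decide_eq_true h2]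
          have hk2 : pvKey "very_close_proximity" = 2 := by rw [pvKey_eq]; simp
          rw [hA, hB, pvMin_eq_of rest c "very_close_proximity" h2]
          · rfl
          · intro y hy
            rw [pvKey_eq y, hk2]
            split_ifs <;> first | omega | (subst_vars; contradiction)
          · intro y hy hk
            rw [pvKey_eq y, hk2] at hk
            split_ifs at hk <;> first | (subst_vars; first | rfl | contradiction) | exact absurd hk (by decide)
        · by_cases h3 : ("azimuth_convergence" : String) ∈ c :: rest
          · have hA : determine_primary_cause_py (c :: rest) = "azimuth_convergence" := by
              simp only [determine_primary_cause_py, pvCausePriority, List.find?, List.contains_eq_mem, decide_eq_false h0, decide_eq_false h1, decide_eq_false h2, decide_eq_true h3]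
            have hk3 : pvKey "azimuth_convergence" = 3 := by rw [pvKey_eq]; simp
            rw [hA, hB, pvMin_eq_of rest c "azimuth_convergence" h3]
            · rfl
            · intro y hy
              rw [pvKey_eq y, hk3]
              split_ifs <;> first | omega | (subst_vars; contradiction)
            · intro y hy hk
              rw [pvKey_eq y, hk3] at hk
              split_ifs at hk <;> first | (subst_vars; first | rfl | contradiction) | exact absurd hk (by decide)
          · by_cases h4 : ("close_proximity" : String) ∈ c :: rest
            · have hA : determine_primary_cause_py (c :: rest) = "close_proximity" := by
                simp only [determine_primary_cause_py, pvCausePriority, List.find?, List.contains_eq_mem, decide_eq_false h0, decide_eq_false h1, decide_eq_false h2, decide_eq_false h3, decide_eq_true h4]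
              have hk4 : pvKey "close_proximity" = 4 := by rw [pvKey_eq]; simp
              rw [hA, hB, pvMin_eq_of rest c "close_proximity" h4]
              · rfl
              · intro y hy
                rw [pvKey_eq y, hk4]
                split_ifs <;> first | omega | (subst_vars; contradiction)
              · intro y hy hk
                rw [pvKey_eq y, hk4] at hk
                split_ifs at hk <;> first | (subst_vars; first | rfl | contradiction) | exact absurd hk (by decide)
            · by_cases h5 : ("inconsistent_tilt" : String) ∈ c :: rest
              · have hA : determine_primary_cause_py (c :: rest) = "inconsistent_tilt" := by
                  simp only [determine_primary_cause_py, pvCausePriority, List.find?, List.contains_eq_mem, decide_eq_false h0, decide_eq_false h1, decide_eq_false h2, decide_eq_false h3, decide_eq_false h4, decide_eq_true h5]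
                have hk5 : pvKey "inconsistent_tilt" = 5 := by rw [pvKey_eq]; simp
                rw [hA, hB, pvMin_eq_of rest c "inconsistent_tilt" h5]
                · rfl
                · intro y hy
                  rw [pvKey_eq y, hk5]
                  split_ifs <;> first | omega | (subst_vars; contradiction)
                · intro y hy hk
                  rw [pvKey_eq y, hk5] at hk
                  split_ifs at hk <;> first | (subst_vars; first | rfl | contradiction) | exact absurd hk (by decide)
              · · have key6 : ∀ z, z ∈ c :: rest → pvKey z = 6 := by
                    intro z hz
                    rw [pvKey_eq]
                    split_ifs <;> first | rfl | (subst_vars; contradiction)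
                  have hA : determine_primary_cause_py (c :: rest) = c := by
                    simp only [determine_primary_cause_py, pvCausePriority, List.find?, List.contains_eq_mem, decide_eq_false h0, decide_eq_false h1, decide_eq_false h2, decide_eq_false h3, decide_eq_false h4, decide_eq_false h5]
                  rw [hA, hB, pvMin_eq_head rest c]
                  · rfl
                  · intro y hy
                    rw [key6 y (by simp [hy]), key6 c (by simp)]
                    omega
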